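-- pv_equiv track=rewrite | github.com/brockwebb/survey-dag-extractor | chunking/block_detect.py | _char_to_page
-- ===== SOURCE A (Python) =====
-- from typing import List, Dict, Tuple, Optional
--
-- def _char_to_page(pos: int, spans_sorted: List[Tuple[int, int, int]], starts_sorted: List[int]) -> int:
--     # Binary search to map char pos to page
--     lo, hi = 0, len(starts_sorted) - 1
--     while lo <= hi:
--         mid = (lo + hi) // 2
--         s, e, p = spans_sorted[mid]
--         if pos < s:
--             hi = mid - 1
--         elif pos >= e:
--             lo = mid + 1
--         else:
--             return p
--     # Fallback: clamp to nearest
--     if not spans_sorted: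
--         return 1
--     if pos < spans_sorted[0][0]:
--         return spans_sorted[0][2]
--     return spans_sorted[-1][2]
-- ===== SOURCE B (Python) =====
-- # Simpler single linear scan over the spans; starts_sorted is only a parallel
-- # index for A's binary search and is not needed here.
-- def _char_to_page(pos, spans_sorted, starts_sorted):
--     for s, e, p in spans_sorted:
--         if s <= pos < e:
--             return p
--     if not spans_sorted:
--         return 1
--     if pos < spans_sorted[0][0]:
--         return spans_sorted[0][2]
--     return spans_sorted[-1][2]
-- ===== Notes on version B (the rewrite author's own statement) =====
-- stated objective: simpler
-- what changed: Replaces the binary search over parallel arrays by a single linear scan of spans_sorted with the identical fallback clamp, ignoring starts_sorted entirely.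
-- outside the precondition, e.g. on _char_to_page(1, [(4, 10, 2), (0, 3, 1)], [4, 0]): A returns 2, B returns 1; on _char_to_page(6, [(0, 3, 5), (4, 10, 2), (20, 30, 7)], [9]): A returns 7, B returns 2; on _char_to_page(0, [], [0]): A raises IndexError, B returns 1
import Mathlib
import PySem

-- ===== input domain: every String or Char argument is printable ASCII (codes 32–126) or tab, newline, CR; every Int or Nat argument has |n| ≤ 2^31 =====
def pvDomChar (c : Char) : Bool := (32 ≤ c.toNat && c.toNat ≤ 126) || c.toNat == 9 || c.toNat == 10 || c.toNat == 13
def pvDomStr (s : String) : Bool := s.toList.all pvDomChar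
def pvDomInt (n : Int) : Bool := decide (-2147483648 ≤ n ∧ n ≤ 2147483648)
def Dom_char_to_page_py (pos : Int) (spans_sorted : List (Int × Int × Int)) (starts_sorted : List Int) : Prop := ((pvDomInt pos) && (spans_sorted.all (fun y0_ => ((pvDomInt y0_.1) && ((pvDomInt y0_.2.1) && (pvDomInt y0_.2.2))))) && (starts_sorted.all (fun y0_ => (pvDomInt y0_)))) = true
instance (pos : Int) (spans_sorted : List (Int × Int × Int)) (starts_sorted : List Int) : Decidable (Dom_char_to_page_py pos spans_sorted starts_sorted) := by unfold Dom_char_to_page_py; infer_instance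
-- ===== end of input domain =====

-- B replaces A's binary search over parallel arrays by one linear scan of spans_sorted
-- with A's exact fallback clamp (objective: simpler); starts_sorted is unused by B.

-- ===== PORT A =====
-- the while-loop: lo, hi evolve; returns some p on the `return p` line, none when the loop exits
def pvBsLoop (pos : Int) (spans : List (Int × Int × Int)) (lo hi : Int) : Option Int :=
  if _h : lo ≤ hi then
    let mid := PySem.Int.floordiv (lo + hi) 2
    match _hg : PySem.List.pyGet? spans mid with
    | none => some 0   -- spans_sorted[mid] raises IndexError in Python; excluded by Pre_
    | some (s, e, p) =>
      if pos < s then pvBsLoop pos spans lo (mid - 1)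
      else if e ≤ pos then pvBsLoop pos spans (mid + 1) hi
      else some p
  else none
termination_by (hi + 1 - lo).toNat
decreasing_by
  · have := PySem.Int.floordiv_two_mid_bounds (lo := lo) (hi := hi) _h; omega
  · have := PySem.Int.floordiv_two_mid_bounds (lo := lo) (hi := hi) _h; omega

def char_to_page_py (pos : Int) (spans_sorted : List (Int × Int × Int)) (starts_sorted : List Int) : Int :=
  match pvBsLoop pos spans_sorted 0 (PySem.List.len starts_sorted - 1) with
  | some p => p
  | none =>
    match spans_sorted with
    | [] => 1
    | (s0, _, p0) :: _ =>
      if pos < s0 then p0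
      else (PySem.List.pyGetD spans_sorted (-1) (0, 0, 0)).2.2

-- ===== PORT B =====
-- the for-loop of B: first span containing pos
def pvFindPage (pos : Int) : List (Int × Int × Int) → Option Int
  | [] => none
  | (s, e, p) :: rest => if s ≤ pos ∧ pos < e then some p else pvFindPage pos rest

def char_to_page_py_alt (pos : Int) (spans_sorted : List (Int × Int × Int)) (starts_sorted : List Int) : Int :=
  match pvFindPage pos spans_sorted with
  | some p => p
  | none =>
    match spans_sorted with
    | [] => 1
    | (s0, _, p0) :: _ =>
      if pos < s0 then p0
      else (PySem.List.pyGetD spans_sorted (-1) (0, 0, 0)).2.2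

-- ===== PRECONDITION & SPEC =====
-- Pre_ admits: inputs where pos precedes every span's start and A's first probe is in range
-- (the search only ever moves left and falls through), and inputs with starts_sorted no longer
-- than spans_sorted where either no span contains pos or the spans are sorted by start and end
-- with earlier ends before later starts and no containing span lies beyond the searched prefix.
-- It excludes inputs where A raises IndexError (starts_sorted too long) and inputs whose
-- containing span A's binary search can miss — unsorted spans or a containing span beyond the
-- prefix len(starts_sorted) — where A's clamp answer is an accident of the broken parallel arrays.
def Pre_char_to_page_py (pos : Int) (spans_sorted : List (Int × Int × Int)) (starts_sorted : List Int) : Prop :=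
  ((∀ t ∈ spans_sorted, pos < t.1) ∧
    PySem.Int.floordiv ((starts_sorted.length : Int) - 1) 2 < (spans_sorted.length : Int)) ∨
  (starts_sorted.length ≤ spans_sorted.length ∧
    ((∀ t ∈ spans_sorted, ¬ (t.1 ≤ pos ∧ pos < t.2.1)) ∨
      (spans_sorted.Pairwise (fun a b => a.1 ≤ b.1 ∧ a.2.1 ≤ b.2.1 ∧ a.2.1 ≤ b.1) ∧
        ∀ t ∈ spans_sorted.drop starts_sorted.length, ¬ (t.1 ≤ pos ∧ pos < t.2.1))))
instance (pos : Int) (spans_sorted : List (Int × Int × Int)) (starts_sorted : List Int) : Decidable (Pre_char_to_page_py pos spans_sorted starts_sorted) := by unfold Pre_char_to_page_py; infer_instance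

def pvWitness_char_to_page_py : Int × (List (Int × Int × Int)) × List Int :=
  (5, [(0, 3, 1), (4, 10, 2)], [0, 4])

def Spec_char_to_page_py (pos : Int) (spans_sorted : List (Int × Int × Int)) (starts_sorted : List Int) (out : Int) : Prop := out = char_to_page_py_alt pos spans_sorted starts_sorted
instance (pos : Int) (spans_sorted : List (Int × Int × Int)) (starts_sorted : List Int) (out : Int) : Decidable (Spec_char_to_page_py pos spans_sorted starts_sorted out) := by unfold Spec_char_to_page_py; infer_instance

-- ===== CLAIM (what is proved, stated in full; the proofs are below) =====
def Claim_equal_char_to_page_py : Prop := ∀ (pos : Int) (spans_sorted : List (Int × Int × Int)) (starts_sorted : List Int), Dom_char_to_page_py pos spans_sorted starts_sorted → Pre_char_to_page_py pos spans_sorted starts_sorted → Spec_char_to_page_py pos spans_sorted starts_sorted (char_to_page_py pos spans_sorted starts_sorted)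

-- ===== LEMMAS AND PROOFS =====

lemma pvFindPage_eq_none {pos : Int} {l : List (Int × Int × Int)}
    (h : ∀ t ∈ l, ¬ (t.1 ≤ pos ∧ pos < t.2.1)) : pvFindPage pos l = none := by
  induction l with
  | nil => rfl
  | cons a rest ih =>
    obtain ⟨s, e, p⟩ := a
    simp only [pvFindPage]
    rw [if_neg (h _ (List.mem_cons_self))]
    exact ih fun t ht => h t (List.mem_cons_of_mem _ ht)

lemma pvFindPage_of_mem {pos : Int} {l : List (Int × Int × Int)} {t : Int × Int × Int}
    (hp : l.Pairwise (fun a b => a.2.1 ≤ b.1)) (ht : t ∈ l)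
    (hc : t.1 ≤ pos ∧ pos < t.2.1) : pvFindPage pos l = some t.2.2 := by
  induction l with
  | nil => cases ht
  | cons a rest ih =>
    obtain ⟨s, e, p⟩ := a
    rw [List.pairwise_cons] at hp
    simp only [pvFindPage]
    rcases List.mem_cons.mp ht with h | h
    · subst h; rw [if_pos hc]
    · rw [if_neg, ih hp.2 h]
      rintro ⟨_, h2⟩
      exact absurd (le_trans (hp.1 t h) hc.1) (not_le.mpr h2)

-- the binary search with valid invariants computes the unique containing span's page
lemma pvBsLoop_eq (pos : Int) (l : List (Int × Int × Int))
    (hp : l.Pairwise (fun a b => a.1 ≤ b.1 ∧ a.2.1 ≤ b.2.1 ∧ a.2.1 ≤ b.1))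
    (lo hi : Int) (hlo : 0 ≤ lo) (hhi : hi < (l.length : Int))
    (inv1 : ∀ j : Nat, (hj : j < l.length) → (j : Int) < lo → ¬ (l[j].1 ≤ pos ∧ pos < l[j].2.1))
    (inv2 : ∀ j : Nat, (hj : j < l.length) → hi < (j : Int) → ¬ (l[j].1 ≤ pos ∧ pos < l[j].2.1)) :
    pvBsLoop pos l lo hi = pvFindPage pos l := by
  have hmono : ∀ i j : Nat, (hi' : i < l.length) → (hj' : j < l.length) → i < j →
      l[i].1 ≤ l[j].1 ∧ l[i].2.1 ≤ l[j].2.1 ∧ l[i].2.1 ≤ l[j].1 :=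
    fun i j hi' hj' hij => List.pairwise_iff_getElem.mp hp i j hi' hj' hij
  fun_induction pvBsLoop pos l lo hi with
  | case1 lo hi hle mid hnone =>
    -- pyGet? = none is impossible: 0 ≤ lo ≤ mid ≤ hi < length
    have hb : lo ≤ mid ∧ mid ≤ hi := PySem.Int.floordiv_two_mid_bounds hle
    rw [PySem.List.pyGet?_eq_some_getElem l (by omega) (by omega)] at hnone
    exact absurd hnone (Option.some_ne_none _)
  | case2 lo hi hle mid s e p hget hlt ih =>
    -- pos < s : recurse on the left half; nothing at or right of mid contains pos
    have hb : lo ≤ mid ∧ mid ≤ hi := PySem.Int.floordiv_two_mid_bounds hle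
    rw [PySem.List.pyGet?_eq_some_getElem l (by omega) (by omega)] at hget
    have hmidlen : mid.toNat < l.length := by omega
    have hmid : l[mid.toNat] = (s, e, p) := by injection hget
    refine ih hlo (by omega) inv1 ?_
    intro j hj hgt hc
    rcases Nat.lt_or_ge mid.toNat j with hcase | hcase
    · have h1 : pos < l[mid.toNat].1 := by rw [hmid]; exact hlt
      exact absurd hc.1 (not_le.mpr (lt_of_lt_of_le h1 (hmono _ _ hmidlen hj hcase).1))
    · have hjm : j = mid.toNat := by omega
      subst hjm; rw [hmid] at hc; exact absurd hc.1 (not_le.mpr hlt)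
  | case3 lo hi hle mid s e p hget hlt hge ih =>
    -- e ≤ pos : recurse on the right half; nothing at or left of mid contains pos
    have hb : lo ≤ mid ∧ mid ≤ hi := PySem.Int.floordiv_two_mid_bounds hle
    rw [PySem.List.pyGet?_eq_some_getElem l (by omega) (by omega)] at hget
    have hmidlen : mid.toNat < l.length := by omega
    have hmid : l[mid.toNat] = (s, e, p) := by injection hget
    refine ih (by omega) hhi ?_ inv2
    intro j hj hltj hc
    rcases Nat.lt_or_ge j mid.toNat with hcase | hcase
    · have h2 : l[mid.toNat].2.1 ≤ pos := by rw [hmid]; exact hge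
      exact absurd hc.2 (not_lt.mpr (le_trans (hmono _ _ hj hmidlen hcase).2.1 h2))
    · have hjm : j = mid.toNat := by omega
      subst hjm; rw [hmid] at hc; exact absurd hc.2 (not_lt.mpr hge)
  | case4 lo hi hle mid s e p hget hlt hge =>
    -- s ≤ pos < e : found; the containing span is unique, so the linear scan agrees
    have hb : lo ≤ mid ∧ mid ≤ hi := PySem.Int.floordiv_two_mid_bounds hle
    rw [PySem.List.pyGet?_eq_some_getElem l (by omega) (by omega)] at hget
    have hmidlen : mid.toNat < l.length := by omega
    have hmid : l[mid.toNat] = (s, e, p) := by injection hget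
    have hfp := pvFindPage_of_mem (pos := pos) (hp.imp fun h => h.2.2)
      (List.getElem_mem hmidlen) (by rw [hmid]; exact ⟨not_lt.mp hlt, not_le.mp hge⟩)
    rw [hfp, hmid]
  | case5 lo hi hgt =>
    -- loop exited: no span contains pos
    symm
    apply pvFindPage_eq_none
    intro t ht hc
    obtain ⟨j, hj, rfl⟩ := List.mem_iff_getElem.mp ht
    rcases Int.lt_or_le (j : Int) lo with hcase | hcase
    · exact inv1 j hj hcase hc
    · exact inv2 j hj (by omega) hc

-- when no span contains pos the binary search can never hit its return line
lemma pvBsLoop_none (pos : Int) (l : List (Int × Int × Int))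
    (hnc : ∀ t ∈ l, ¬ (t.1 ≤ pos ∧ pos < t.2.1))
    (lo hi : Int) (hlo : 0 ≤ lo) (hhi : hi < (l.length : Int)) :
    pvBsLoop pos l lo hi = none := by
  fun_induction pvBsLoop pos l lo hi with
  | case1 lo hi hle mid hnone =>
    have hb : lo ≤ mid ∧ mid ≤ hi := PySem.Int.floordiv_two_mid_bounds hle
    rw [PySem.List.pyGet?_eq_some_getElem l (by omega) (by omega)] at hnone
    exact absurd hnone (Option.some_ne_none _)
  | case2 lo hi hle mid s e p hget hlt ih =>
    have hb : lo ≤ mid ∧ mid ≤ hi := PySem.Int.floordiv_two_mid_bounds hle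
    exact ih hlo (by omega)
  | case3 lo hi hle mid s e p hget hlt hge ih =>
    have hb : lo ≤ mid ∧ mid ≤ hi := PySem.Int.floordiv_two_mid_bounds hle
    exact ih (by omega) hhi
  | case4 lo hi hle mid s e p hget hlt hge =>
    have hb : lo ≤ mid ∧ mid ≤ hi := PySem.Int.floordiv_two_mid_bounds hle
    rw [PySem.List.pyGet?_eq_some_getElem l (by omega) (by omega)] at hget
    have hmid : l[mid.toNat] = (s, e, p) := by injection hget
    have hm : (s, e, p) ∈ l := hmid ▸ List.getElem_mem (by omega)
    exact absurd ⟨not_lt.mp hlt, not_le.mp hge⟩ (hnc _ hm)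
  | case5 lo hi hgt => rfl

-- when pos precedes every start the search only moves left; probes stay below the first one
lemma pvBsLoop_left (pos : Int) (l : List (Int × Int × Int))
    (hall : ∀ t ∈ l, pos < t.1)
    (lo hi : Int) (hlo : 0 ≤ lo)
    (hmid : lo ≤ hi → PySem.Int.floordiv (lo + hi) 2 < (l.length : Int)) :
    pvBsLoop pos l lo hi = none := by
  fun_induction pvBsLoop pos l lo hi with
  | case1 lo hi hle mid hnone =>
    have hb : lo ≤ mid ∧ mid ≤ hi := PySem.Int.floordiv_two_mid_bounds hle
    have hm := hmid hle
    rw [PySem.List.pyGet?_eq_some_getElem l (by omega) (by omega)] at hnone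
    exact absurd hnone (Option.some_ne_none _)
  | case2 lo hi hle mid s e p hget hlt ih =>
    have hb : lo ≤ mid ∧ mid ≤ hi := PySem.Int.floordiv_two_mid_bounds hle
    have hm := hmid hle
    refine ih hlo fun hle2 => ?_
    have hb2 := PySem.Int.floordiv_two_mid_bounds hle2
    omega
  | case3 lo hi hle mid s e p hget hlt hge ih =>
    have hb : lo ≤ mid ∧ mid ≤ hi := PySem.Int.floordiv_two_mid_bounds hle
    have hm := hmid hle
    rw [PySem.List.pyGet?_eq_some_getElem l (by omega) (by omega)] at hget
    have hmd : l[mid.toNat] = (s, e, p) := by injection hget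
    have hm2 : (s, e, p) ∈ l := hmd ▸ List.getElem_mem (by omega)
    exact absurd (hall _ hm2) hlt
  | case4 lo hi hle mid s e p hget hlt hge =>
    have hb : lo ≤ mid ∧ mid ≤ hi := PySem.Int.floordiv_two_mid_bounds hle
    have hm := hmid hle
    rw [PySem.List.pyGet?_eq_some_getElem l (by omega) (by omega)] at hget
    have hmd : l[mid.toNat] = (s, e, p) := by injection hget
    have hm2 : (s, e, p) ∈ l := hmd ▸ List.getElem_mem (by omega)
    exact absurd (hall _ hm2) hlt
  | case5 lo hi hgt => rfl

-- ===== VERDICT (by name: the statement is the Claim_ definition above) =====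
theorem char_to_page_py_spec : Claim_equal_char_to_page_py := by
  intro pos spans starts _hdom hpre
  unfold Spec_char_to_page_py char_to_page_py char_to_page_py_alt
  obtain ⟨hall, hfirst⟩ | ⟨hlen, hnc | ⟨hp, htail⟩⟩ := hpre
  · -- pos precedes every start: the search only moves left and falls through
    rw [pvBsLoop_left pos spans hall 0 (PySem.List.len starts - 1) le_rfl
        (fun _ => by
          simp only [PySem.List.len_eq]
          have : (0 : Int) + ((starts.length : Int) - 1) = (starts.length : Int) - 1 := by ring
          rw [this]; exact hfirst),
      pvFindPage_eq_none (fun t ht hc => absurd hc.1 (not_le.mpr (hall t ht)))]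
  · -- no span contains pos: the search falls through and the scan finds nothing
    rw [pvBsLoop_none pos spans hnc 0 (PySem.List.len starts - 1) le_rfl
        (by simp only [PySem.List.len_eq]; omega),
      pvFindPage_eq_none hnc]
  · rw [pvBsLoop_eq pos spans hp 0 (PySem.List.len starts - 1) le_rfl
        (by simp only [PySem.List.len_eq]; omega)
        (fun j hj hlt => absurd hlt (by omega))
        (fun j hj hlt => by
          simp only [PySem.List.len_eq] at hlt
          refine htail spans[j] ?_
          rw [List.mem_iff_getElem]
          exact ⟨j - starts.length, by rw [List.length_drop]; omega,
            by rw [List.getElem_drop]; congr 1; omega⟩)]
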